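-- pv_equiv track=rewrite | github.com/Salymka/SalymkaGameStation | Sound-Conventor/script.py | merge_notes
-- ===== SOURCE A (Python) =====
-- def merge_notes(notes, min_duration_ms=30):
--     """Merge neighboring identical notes and drop tiny fragments."""
--     if not notes:
--         return []
--
--     merged = [list(notes[0])]
--     for freq, dur in notes[1:]:
--         if freq == merged[-1][0]:
--             merged[-1][1] += dur
--         else:
--             merged.append([freq, dur])
--
--     # remove too-short fragments by merging into previous/next note
--     cleaned = []
--     for i, (freq, dur) in enumerate(merged):
--         if dur >= min_duration_ms or not cleaned:
--             cleaned.append([freq, dur])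
--         else:
--             cleaned[-1][1] += dur
--
--     return [(int(freq), int(dur)) for freq, dur in cleaned]
-- ===== SOURCE B (Python) =====
-- def merge_notes(notes, min_duration_ms=30):
--     """Single fused pass: keep a running group (cur_f, cur_d); finalize it
--     with the short-fragment rule when the frequency changes and at the end."""
--     if not notes:
--         return []
--
--     def finalize(cleaned, cf, cd):
--         if cd >= min_duration_ms or not cleaned:
--             cleaned.append((cf, cd))
--         else:
--             pf, pd = cleaned[-1]
--             cleaned[-1] = (pf, pd + cd)
--
--     cleaned = []
--     cur_f, cur_d = notes[0]
--     for f, d in notes[1:]: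
--         if f == cur_f:
--             cur_d += d
--         else:
--             finalize(cleaned, cur_f, cur_d)
--             cur_f, cur_d = f, d
--     finalize(cleaned, cur_f, cur_d)
--     return [(int(f), int(d)) for f, d in cleaned]
-- ===== Notes on version B (the rewrite author's own statement) =====
-- stated objective: simpler
-- what changed: Fuses A's two sequential passes (adjacent-merge pass then short-fragment pass) into one linear loop that keeps a running current group and finalizes it with the short-fragment rule at each frequency change and at the end.
import Mathlib
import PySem

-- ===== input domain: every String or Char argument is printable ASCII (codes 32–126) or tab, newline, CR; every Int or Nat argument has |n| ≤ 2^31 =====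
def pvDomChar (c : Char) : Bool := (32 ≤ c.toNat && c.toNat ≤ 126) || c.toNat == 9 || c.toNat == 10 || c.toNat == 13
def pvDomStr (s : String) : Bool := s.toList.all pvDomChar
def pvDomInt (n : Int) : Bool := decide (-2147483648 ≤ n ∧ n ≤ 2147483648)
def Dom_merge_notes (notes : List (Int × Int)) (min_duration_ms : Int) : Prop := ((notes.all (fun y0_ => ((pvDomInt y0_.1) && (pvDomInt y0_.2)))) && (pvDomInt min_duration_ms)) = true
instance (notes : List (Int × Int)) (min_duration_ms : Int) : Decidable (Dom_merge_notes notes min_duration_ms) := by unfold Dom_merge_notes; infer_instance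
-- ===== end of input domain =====

-- B fuses A's two passes into one linear loop with a running current group; objective: simpler (same cost).

-- ===== PORT A =====
-- A's first loop: merged[-1] is inspected/updated, new groups are appended.
def mergeStep (acc : List (Int × Int)) (fd : Int × Int) : List (Int × Int) :=
  match acc.getLast? with
  | some (lf, ld) => if fd.1 == lf then acc.dropLast ++ [(lf, ld + fd.2)] else acc ++ [fd]
  | none => acc ++ [fd]

-- A's second loop: drop/absorb too-short fragments.
def cleanStep (m : Int) (acc : List (Int × Int)) (fd : Int × Int) : List (Int × Int) :=
  if fd.2 ≥ m ∨ acc = [] then acc ++ [fd]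
  else
    match acc.getLast? with
    | some (pf, pd) => acc.dropLast ++ [(pf, pd + fd.2)]
    | none => acc

def merge_notes (notes : List (Int × Int)) (min_duration_ms : Int) : List (Int × Int) :=
  match notes with
  | [] => []
  | h :: t =>
    let merged := t.foldl mergeStep [h]
    let cleaned := merged.foldl (cleanStep min_duration_ms) []
    cleaned.map (fun fd => (fd.1, fd.2))   -- the int() casts: identity on Int

-- ===== PORT B =====
-- B's finalize: apply the short-fragment rule to the finished group.
def finalizeB (m : Int) (cleaned : List (Int × Int)) (cf cd : Int) : List (Int × Int) :=
  if cd ≥ m ∨ cleaned = [] then cleaned ++ [(cf, cd)]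
  else
    match cleaned.getLast? with
    | some (pf, pd) => cleaned.dropLast ++ [(pf, pd + cd)]
    | none => cleaned

def merge_notes_alt (notes : List (Int × Int)) (min_duration_ms : Int) : List (Int × Int) :=
  match notes with
  | [] => []
  | h :: t =>
    let st := t.foldl (fun (s : List (Int × Int) × Int × Int) fd =>
      if fd.1 == s.2.1 then (s.1, s.2.1, s.2.2 + fd.2)
      else (finalizeB min_duration_ms s.1 s.2.1 s.2.2, fd.1, fd.2)) ([], h.1, h.2)
    (finalizeB min_duration_ms st.1 st.2.1 st.2.2).map (fun fd => (fd.1, fd.2))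

-- ===== PRECONDITION & SPEC =====
def Spec_merge_notes (notes : List (Int × Int)) (min_duration_ms : Int) (out : List (Int × Int)) : Prop := out = merge_notes_alt notes min_duration_ms
instance (notes : List (Int × Int)) (min_duration_ms : Int) (out : List (Int × Int)) : Decidable (Spec_merge_notes notes min_duration_ms out) := by unfold Spec_merge_notes; infer_instance

-- ===== CLAIM (what is proved, stated in full; the proofs are below) =====
def Claim_equal_merge_notes : Prop := ∀ (notes : List (Int × Int)) (min_duration_ms : Int), Dom_merge_notes notes min_duration_ms → Spec_merge_notes notes min_duration_ms (merge_notes notes min_duration_ms)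

-- ===== LEMMAS AND PROOFS =====

-- the abstract grouping: groups of t given a current open group (cf, cd)
def groups (t : List (Int × Int)) (cf cd : Int) : List (Int × Int) :=
  match t with
  | [] => [(cf, cd)]
  | (f, d) :: t' => if f == cf then groups t' cf (cd + d) else (cf, cd) :: groups t' f d

theorem foldl_mergeStep (t : List (Int × Int)) (acc : List (Int × Int)) (cf cd : Int) :
    t.foldl mergeStep (acc ++ [(cf, cd)]) = acc ++ groups t cf cd := by
  induction t generalizing acc cf cd with
  | nil => simp [groups]
  | cons fd t' ih =>
    obtain ⟨f, d⟩ := fd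
    simp only [List.foldl_cons, mergeStep, List.getLast?_concat, groups]
    by_cases h : f == cf
    · simp [h, ih]
    · simp only [h, if_neg, Bool.false_eq_true, not_false_eq_true]
      rw [ih (acc ++ [(cf, cd)]) f d]
      simp

theorem foldl_fused (m : Int) (t : List (Int × Int)) (cleaned : List (Int × Int)) (cf cd : Int) :
    (fun st => finalizeB m st.1 st.2.1 st.2.2)
      (t.foldl (fun (s : List (Int × Int) × Int × Int) fd =>
        if fd.1 == s.2.1 then (s.1, s.2.1, s.2.2 + fd.2)
        else (finalizeB m s.1 s.2.1 s.2.2, fd.1, fd.2)) (cleaned, cf, cd))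
      = (groups t cf cd).foldl (cleanStep m) cleaned := by
  induction t generalizing cleaned cf cd with
  | nil =>
    simp only [List.foldl_nil, groups, List.foldl_cons]
    rfl
  | cons fd t' ih =>
    obtain ⟨f, d⟩ := fd
    simp only [List.foldl_cons, groups]
    by_cases h : f == cf
    · simp only [h, if_pos, ih]
    · simp only [h, Bool.false_eq_true, if_neg, not_false_eq_true, ih, List.foldl_cons]
      rfl

-- ===== VERDICT (by name: the statement is the Claim_ definition above) =====
theorem merge_notes_spec : Claim_equal_merge_notes := by
  intro notes m _
  unfold Spec_merge_notes merge_notes merge_notes_alt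
  match notes with
  | [] => rfl
  | ⟨f0, d0⟩ :: t =>
    simp only
    have h1 : t.foldl mergeStep [(f0, d0)] = groups t f0 d0 := by
      have := foldl_mergeStep t [] f0 d0
      simpa using this
    have h2 := foldl_fused m t [] f0 d0
    rw [h1]
    simp only at h2
    rw [← h2]
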